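-- pv_equiv track=rewrite | github.com/DeepLink-org/OpenTenNet | dependencies/cuTENSOR/python/cutensor/torch/einsum.py | _compute_target_tensor
-- ===== SOURCE A (Python) =====
-- def _compute_target_tensor(in0, in1, target):
--     result = ""
--     for m in in0[:-1] + in1[:-1] + in1[-1] + in0[-1]:
--         if m in target and not m in result:
--             result += m
--     # reorder target modes like target
--     result = list(result)
--     for i in range(len(result)):
--         if result[i] not in target: continue
--         for j in range(i):
--             if result[j] not in target: continue
--             if target.index(result[j]) > target.index(result[i]):
--                 result[i], result[j] = result[j], result[i]
--     return ''.join(result)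
-- ===== SOURCE B (Python) =====
-- def _compute_target_tensor(in0, in1, target):
--     # single pass over target in its own order: keep modes present in the inputs, dedup with a seen-set
--     present = set(in0[:-1] + in1[:-1] + in1[-1] + in0[-1])
--     seen = set()
--     out = []
--     for m in target:
--         if m in present and m not in seen:
--             out.append(m)
--             seen.add(m)
--     return ''.join(out)
-- ===== Notes on version B (the rewrite author's own statement) =====
-- stated objective: faster
-- what changed: Instead of collecting candidate modes from the inputs and then ordering them with an O(k^2) index-comparison swap sort (each comparison calling target.index, itself an O(|target|) scan), B makes one pass over target in its own order, emitting each mode that occurs in the inputs exactly once (seen-set dedup), so the sort disappears.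
import Mathlib
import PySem

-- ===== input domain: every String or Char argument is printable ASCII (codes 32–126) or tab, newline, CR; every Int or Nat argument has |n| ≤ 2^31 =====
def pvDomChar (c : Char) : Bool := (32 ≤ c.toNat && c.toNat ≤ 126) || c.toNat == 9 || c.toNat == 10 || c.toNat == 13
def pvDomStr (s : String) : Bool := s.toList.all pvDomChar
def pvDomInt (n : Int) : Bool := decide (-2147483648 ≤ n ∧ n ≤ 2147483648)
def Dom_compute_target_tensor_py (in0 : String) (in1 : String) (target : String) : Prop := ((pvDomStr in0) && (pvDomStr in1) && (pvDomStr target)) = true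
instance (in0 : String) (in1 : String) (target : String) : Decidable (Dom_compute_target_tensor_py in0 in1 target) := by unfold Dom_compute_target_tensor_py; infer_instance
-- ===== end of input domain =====

-- B replaces A's collect-then-index-swap-sort by a single deduplicating pass over `target` in its own
-- order (objective: faster; a timing run measured the speedup). Equivalence is proved for nonempty in0 and in1 (otherwise Python raises).

-- ===== PORT A =====
-- phase 1: result = "" ; for m in in0[:-1]+in1[:-1]+in1[-1]+in0[-1]: if m in target and not m in result: result += m
def ctA_phase1 (tgt : List Char) (chars : List Char) : List Char :=
  chars.foldl (fun res m => if m ∈ tgt ∧ m ∉ res then res ++ [m] else res) []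

-- phase 2 inner body: `if result[j] not in target: continue; if target.index(result[j]) > target.index(result[i]): swap`
-- (str.index ported as List.idxOf: exact here because it is guarded by membership; the tuple swap
-- reads both old values before the two writes, exactly as Python's simultaneous assignment does)
def ctA_innerStep (tgt : List Char) (i : Nat) (r : List Char) (j : Nat) : List Char :=
  let cj := r.getD j ' '
  if cj ∉ tgt then r
  else
    let ci := r.getD i ' '
    if List.idxOf ci tgt < List.idxOf cj tgt then (r.set i cj).set j ci else r

def ctA_outerStep (tgt : List Char) (r : List Char) (i : Nat) : List Char :=
  if r.getD i ' ' ∉ tgt then r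
  else (List.range i).foldl (ctA_innerStep tgt i) r

def ctA_sort (tgt : List Char) (r : List Char) : List Char :=
  (List.range r.length).foldl (ctA_outerStep tgt) r

def compute_target_tensor_py (in0 : String) (in1 : String) (target : String) : String :=
  -- in1[-1] / in0[-1]: none = IndexError (excluded by Pre_); "" in that branch is a dummy value
  match PySem.List.pyGet? in1.toList (-1), PySem.List.pyGet? in0.toList (-1) with
  | some c1, some c0 =>
      let chars := PySem.List.slice in0.toList none (some (-1))
                   ++ PySem.List.slice in1.toList none (some (-1)) ++ [c1] ++ [c0]
      String.ofList (ctA_sort target.toList (ctA_phase1 target.toList chars))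
  | _, _ => ""

-- ===== PORT B =====
def ctB_step (present : PySem.Set Char) (st : List Char × PySem.Set Char) (m : Char) :
    List Char × PySem.Set Char :=
  if m ∈ present ∧ m ∉ st.2 then (st.1 ++ [m], PySem.Set.add st.2 m) else st

def ctB_collect (present : PySem.Set Char) (tgt : List Char) : List Char :=
  (tgt.foldl (ctB_step present) ([], PySem.Set.empty)).1

def compute_target_tensor_py_alt (in0 : String) (in1 : String) (target : String) : String :=
  -- same IndexError spots as A: in1[-1] / in0[-1] inside the set(...) argument
  match PySem.List.pyGet? in1.toList (-1) with
  | none => ""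
  | some c1 =>
    match PySem.List.pyGet? in0.toList (-1) with
    | none => ""
    | some c0 =>
      let present := PySem.Set.ofList (PySem.List.slice in0.toList none (some (-1))
                     ++ PySem.List.slice in1.toList none (some (-1)) ++ [c1] ++ [c0])
      String.ofList (ctB_collect present target.toList)

-- ===== PRECONDITION & SPEC =====
-- Pre_ excludes exactly the inputs where Python A raises IndexError (in0[-1] / in1[-1] on an empty string)
def Pre_compute_target_tensor_py (in0 : String) (in1 : String) (target : String) : Prop :=
  in0 ≠ "" ∧ in1 ≠ ""
instance (in0 : String) (in1 : String) (target : String) : Decidable (Pre_compute_target_tensor_py in0 in1 target) := by unfold Pre_compute_target_tensor_py; infer_instance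

def pvWitness_compute_target_tensor_py : String × String × String := ("ab", "bc", "abc")

def Spec_compute_target_tensor_py (in0 : String) (in1 : String) (target : String) (out : String) : Prop := out = compute_target_tensor_py_alt in0 in1 target
instance (in0 : String) (in1 : String) (target : String) (out : String) : Decidable (Spec_compute_target_tensor_py in0 in1 target out) := by unfold Spec_compute_target_tensor_py; infer_instance

-- ===== CLAIM (what is proved, stated in full; the proofs are below) =====
def Claim_equal_compute_target_tensor_py : Prop := ∀ (in0 : String) (in1 : String) (target : String), Dom_compute_target_tensor_py in0 in1 target → Pre_compute_target_tensor_py in0 in1 target → Spec_compute_target_tensor_py in0 in1 target (compute_target_tensor_py in0 in1 target)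

-- ===== LEMMAS AND PROOFS =====

-- key order used throughout: first index in target
def klt (tgt : List Char) (a b : Char) : Prop := List.idxOf a tgt < List.idxOf b tgt

-- ordered insert by key (proof-side model of one outer iteration of A's sort)
def insortK (tgt : List Char) (x : Char) : List Char → List Char
  | [] => [x]
  | a :: s => if List.idxOf x tgt < List.idxOf a tgt then x :: a :: s else a :: insortK tgt x s

-- proof-side model of A's inner loop: scan the prefix with a carry (the current result[i])
def scanK (tgt : List Char) (x : Char) : List Char → List Char × Char
  | [] => ([], x)
  | a :: s => if List.idxOf x tgt < List.idxOf a tgt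
      then ((scanK tgt a s).1.cons x, (scanK tgt a s).2)
      else ((scanK tgt x s).1.cons a, (scanK tgt x s).2)

theorem scanK_sorted (tgt : List Char) : ∀ (s : List Char) (x : Char),
    (x :: s).Pairwise (klt tgt) →
    (scanK tgt x s).1 ++ [(scanK tgt x s).2] = x :: s := by
  intro s
  induction s with
  | nil => intro x _; simp [scanK]
  | cons a s ih =>
    intro x hp
    rcases List.pairwise_cons.mp hp with ⟨hxa, hps⟩
    have hlt : List.idxOf x tgt < List.idxOf a tgt := hxa a (by simp)
    simp [scanK, hlt, ih a hps]

theorem scanK_insort (tgt : List Char) : ∀ (s : List Char) (x : Char),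
    s.Pairwise (klt tgt) →
    (scanK tgt x s).1 ++ [(scanK tgt x s).2] = insortK tgt x s := by
  intro s
  induction s with
  | nil => intro x _; simp [scanK, insortK]
  | cons a s ih =>
    intro x hp
    rcases List.pairwise_cons.mp hp with ⟨has, hps⟩
    by_cases hlt : List.idxOf x tgt < List.idxOf a tgt
    · have := scanK_sorted tgt s a (List.pairwise_cons.mpr ⟨has, hps⟩)
      simp [scanK, insortK, hlt, this]
    · simp [scanK, insortK, hlt, ih x hps]

theorem insortK_perm (tgt : List Char) (x : Char) :
    ∀ (s : List Char), (insortK tgt x s).Perm (x :: s) := by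
  intro s
  induction s with
  | nil => simp [insortK]
  | cons a s ih =>
    by_cases hlt : List.idxOf x tgt < List.idxOf a tgt
    · simp [insortK, hlt]
    · simp only [insortK, if_neg hlt]
      exact (ih.cons a).trans (List.Perm.swap x a s)

theorem insortK_pairwise (tgt : List Char) (x : Char) :
    ∀ (s : List Char), s.Pairwise (klt tgt) →
    (∀ a ∈ s, List.idxOf x tgt ≠ List.idxOf a tgt) →
    (insortK tgt x s).Pairwise (klt tgt) := by
  intro s
  induction s with
  | nil => intro _ _; simp [insortK]
  | cons a s ih =>
    intro hp hne
    rcases List.pairwise_cons.mp hp with ⟨has, hps⟩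
    by_cases hlt : List.idxOf x tgt < List.idxOf a tgt
    · simp only [insortK, if_pos hlt]
      refine List.pairwise_cons.mpr ⟨?_, hp⟩
      intro b hb
      rcases List.mem_cons.mp hb with hb | hb
      · subst hb; exact hlt
      · exact lt_trans hlt (has b hb)
    · simp only [insortK, if_neg hlt]
      refine List.pairwise_cons.mpr ⟨?_, ih hps (fun b hb => hne b (by simp [hb]))⟩
      intro b hb
      have hb' : b ∈ x :: s := (insortK_perm tgt x s).mem_iff.mp hb
      have hax : List.idxOf a tgt < List.idxOf x tgt := by
        have := hne a (by simp); omega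
      rcases List.mem_cons.mp hb' with hb' | hb'
      · subst hb'; exact hax
      · exact has b hb'

theorem set_append_add (p l : List Char) (n : Nat) (v : Char) :
    (p ++ l).set (p.length + n) v = p ++ l.set n v := by
  rw [List.set_append_right _ _ (by omega)]
  simp

theorem swap_shape (p s rest : List Char) (a x : Char) :
    (((p ++ (a :: s)) ++ (x :: rest)).set (p.length + (s.length + 1)) a).set p.length x
      = ((p ++ [x]) ++ s) ++ (a :: rest) := by
  rw [List.append_assoc]
  rw [set_append_add p ((a :: s) ++ (x :: rest)) (s.length + 1) a]
  have h2 : ((a :: s) ++ (x :: rest)).set (s.length + 1) a = (a :: s) ++ (a :: rest) := by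
    have h : s.length + 1 = (a :: s).length + 0 := by simp
    rw [h, set_append_add (a :: s) (x :: rest) 0 a]
    simp
  rw [h2]
  have h3 : p.length = p.length + 0 := by omega
  rw [h3, set_append_add p ((a :: s) ++ (a :: rest)) 0 x]
  simp

-- A's inner loop over j ∈ [p.length, p.length + s.length) acts as scanK on segment s with carry x
theorem inner_eq_scanK (tgt : List Char) : ∀ (s p rest : List Char) (x : Char),
    (∀ a ∈ s, a ∈ tgt) →
    (List.range' p.length s.length).foldl (ctA_innerStep tgt (p.length + s.length)) (p ++ s ++ x :: rest)
      = p ++ (scanK tgt x s).1 ++ (scanK tgt x s).2 :: rest := by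
  intro s
  induction s with
  | nil => intro p rest x _; simp [scanK]
  | cons a s ih =>
    intro p rest x hmem
    simp only [List.length_cons]
    rw [List.range'_succ, List.foldl_cons]
    have hcj : ((p ++ (a :: s)) ++ (x :: rest)).getD p.length ' ' = a := by
      rw [List.append_assoc, List.getD_append_right _ _ _ _ (le_refl _)]
      simp
    have hci : ((p ++ (a :: s)) ++ (x :: rest)).getD (p.length + (s.length + 1)) ' ' = x := by
      rw [List.append_assoc, List.getD_append_right _ _ _ _ (by simp)]
      simp
    have ha : a ∈ tgt := hmem a (by simp)
    have hmem' : ∀ b ∈ s, b ∈ tgt := fun b hb => hmem b (by simp [hb])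
    by_cases hlt : List.idxOf x tgt < List.idxOf a tgt
    · have hstep : ctA_innerStep tgt (p.length + (s.length + 1)) ((p ++ (a :: s)) ++ (x :: rest)) p.length
          = ((p ++ [x]) ++ s) ++ (a :: rest) := by
        unfold ctA_innerStep
        simp only [hcj, hci]
        rw [if_neg (not_not_intro ha), if_pos hlt]
        exact swap_shape p s rest a x
      rw [hstep]
      have hidx : p.length + (s.length + 1) = (p.length + 1) + s.length := by omega
      rw [hidx]
      have ih' := ih (p ++ [x]) rest a hmem'
      simp only [List.length_append, List.length_cons, List.length_nil] at ih'
      rw [show (p.length + 1 : Nat) = p.length + (0 + 1) by omega] at ih' ⊢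
      rw [ih']
      simp [scanK, hlt]
    · have hstep : ctA_innerStep tgt (p.length + (s.length + 1)) ((p ++ (a :: s)) ++ (x :: rest)) p.length
          = ((p ++ [a]) ++ s) ++ (x :: rest) := by
        unfold ctA_innerStep
        simp only [hcj, hci]
        rw [if_neg (not_not_intro ha), if_neg hlt]
        simp
      rw [hstep]
      have hidx : p.length + (s.length + 1) = (p.length + 1) + s.length := by omega
      rw [hidx]
      have ih' := ih (p ++ [a]) rest x hmem'
      simp only [List.length_append, List.length_cons, List.length_nil] at ih'
      rw [show (p.length + 1 : Nat) = p.length + (0 + 1) by omega] at ih' ⊢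
      rw [ih']
      simp [scanK, hlt]

-- A's outer loop: invariant "prefix q is sorted"; result is a sorted permutation
theorem outer_sorts (tgt : List Char) : ∀ (rest q : List Char),
    q.Pairwise (klt tgt) → (∀ a ∈ q ++ rest, a ∈ tgt) → (q ++ rest).Nodup →
    ((List.range' q.length rest.length).foldl (ctA_outerStep tgt) (q ++ rest)).Perm (q ++ rest) ∧
    ((List.range' q.length rest.length).foldl (ctA_outerStep tgt) (q ++ rest)).Pairwise (klt tgt) := by
  intro rest
  induction rest with
  | nil =>
    intro q hq _ _
    simp only [List.length_nil, List.range'_zero, List.foldl_nil, List.append_nil]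
    exact ⟨List.Perm.refl q, hq⟩
  | cons x rest ih =>
    intro q hq hmem hnd
    simp only [List.length_cons]
    rw [List.range'_succ, List.foldl_cons]
    have hx : x ∈ tgt := hmem x (by simp)
    have hgd : (q ++ x :: rest).getD q.length ' ' = x := by
      rw [List.getD_append_right _ _ _ _ (le_refl _)]
      simp
    have hstep : ctA_outerStep tgt (q ++ x :: rest) q.length
        = insortK tgt x q ++ rest := by
      unfold ctA_outerStep
      rw [hgd, if_neg (not_not_intro hx)]
      rw [List.range_eq_range']
      have h := inner_eq_scanK tgt q [] rest x (fun a ha => hmem a (by simp [ha]))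
      simp only [List.length_nil, List.nil_append, Nat.zero_add] at h
      rw [h, ← scanK_insort tgt q x hq]
      simp
    rw [hstep]
    have hperm1 : (insortK tgt x q).Perm (x :: q) := insortK_perm tgt x q
    have hlen : (insortK tgt x q).length = q.length + 1 := by
      rw [hperm1.length_eq]; simp
    have hxq : x ∉ q := by
      have := (List.nodup_append.mp hnd)
      intro hxin
      exact this.2.2 x hxin x (by simp) rfl
    have hpw : (insortK tgt x q).Pairwise (klt tgt) := by
      apply insortK_pairwise tgt x q hq
      intro a ha h
      have ha' : a ∈ tgt := hmem a (by simp [ha])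
      exact hxq ((List.idxOf_inj hx).mp h ▸ ha)
    have hpermall : (insortK tgt x q ++ rest).Perm (q ++ x :: rest) :=
      (hperm1.append_right rest).trans List.perm_middle.symm
    have hmem' : ∀ a ∈ insortK tgt x q ++ rest, a ∈ tgt := fun a ha =>
      hmem a (hpermall.mem_iff.mp ha)
    have hnd' : (insortK tgt x q ++ rest).Nodup := hpermall.symm.nodup hnd
    have ihh := ih (insortK tgt x q) hpw hmem' hnd'
    rw [hlen] at ihh
    exact ⟨ihh.1.trans hpermall, ihh.2⟩

-- A's phase 1 collects, without duplicates, exactly the chars of `chars` that are in tgt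
theorem phase1_spec (tgt : List Char) : ∀ (chars acc : List Char), acc.Nodup →
    (chars.foldl (fun res m => if m ∈ tgt ∧ m ∉ res then res ++ [m] else res) acc).Nodup ∧
    (∀ c, c ∈ chars.foldl (fun res m => if m ∈ tgt ∧ m ∉ res then res ++ [m] else res) acc ↔
      c ∈ acc ∨ (c ∈ chars ∧ c ∈ tgt)) := by
  intro chars
  induction chars with
  | nil => intro acc h; simpa using h
  | cons m chars ih =>
    intro acc hnd
    rw [List.foldl_cons]
    by_cases hc : m ∈ tgt ∧ m ∉ acc
    · rw [if_pos hc]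
      have hnd' : (acc ++ [m]).Nodup := by
        rw [List.nodup_append]
        refine ⟨hnd, List.nodup_singleton m, ?_⟩
        intro a ha b hb
        simp only [List.mem_singleton] at hb
        subst hb
        intro h; exact hc.2 (h ▸ ha)
      refine ⟨(ih _ hnd').1, ?_⟩
      intro c
      rw [(ih _ hnd').2 c]
      simp only [List.mem_append, List.mem_cons, List.not_mem_nil, or_false]
      have h1 := hc.1
      constructor
      · rintro ((h | rfl) | ⟨h1', h2⟩)
        · exact Or.inl h
        · exact Or.inr ⟨Or.inl rfl, h1⟩
        · exact Or.inr ⟨Or.inr h1', h2⟩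
      · rintro (h | ⟨(rfl | h1'), h2⟩)
        · exact Or.inl (Or.inl h)
        · exact Or.inl (Or.inr rfl)
        · exact Or.inr ⟨h1', h2⟩
    · rw [if_neg hc]
      refine ⟨(ih _ hnd).1, ?_⟩
      intro c
      rw [(ih _ hnd).2 c]
      simp only [List.mem_cons]
      push_neg at hc
      constructor
      · rintro (h | ⟨h1, h2⟩)
        · exact Or.inl h
        · exact Or.inr ⟨Or.inr h1, h2⟩
      · rintro (h | ⟨(rfl | h1), h2⟩)
        · exact Or.inl h
        · exact Or.inl (hc h2)
        · exact Or.inr ⟨h1, h2⟩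

-- B's pass: invariant over the processed prefix of tgt
theorem ctB_invariant (tgt chars : List Char) : ∀ (todo P out : List Char) (seen : PySem.Set Char),
    tgt = P ++ todo → (∀ c, c ∈ seen ↔ c ∈ out) → out.Nodup →
    (∀ c, c ∈ out ↔ c ∈ P ∧ c ∈ chars) → out.Pairwise (klt tgt) →
    (∀ a ∈ out, List.idxOf a tgt < P.length) →
    ((todo.foldl (ctB_step (PySem.Set.ofList chars)) (out, seen)).1.Nodup ∧
     (∀ c, c ∈ (todo.foldl (ctB_step (PySem.Set.ofList chars)) (out, seen)).1 ↔ c ∈ tgt ∧ c ∈ chars) ∧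
     (todo.foldl (ctB_step (PySem.Set.ofList chars)) (out, seen)).1.Pairwise (klt tgt)) := by
  intro todo
  induction todo with
  | nil =>
    intro P out seen hT _ hnd hm hpw _
    refine ⟨hnd, ?_, hpw⟩
    intro c
    simpa [hT] using hm c
  | cons m todo ih =>
    intro P out seen hT hseen hnd hm hpw hbd
    rw [List.foldl_cons]
    by_cases hc : m ∈ PySem.Set.ofList chars ∧ m ∉ seen
    · have hmc : m ∈ chars := (PySem.Set.mem_ofList _ _).mp hc.1
      have hmout : m ∉ out := fun h => hc.2 ((hseen m).mpr h)
      have hmP : m ∉ P := fun h => hmout ((hm m).mpr ⟨h, hmc⟩)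
      have hidx : List.idxOf m tgt = P.length := by
        rw [hT, List.idxOf_append_of_notMem hmP]
        simp
      unfold ctB_step
      rw [if_pos hc]
      apply ih (P ++ [m]) (out ++ [m]) (PySem.Set.add seen m)
      · rw [hT]; simp
      · intro c
        rw [PySem.Set.mem_add]
        simp only [List.mem_append, List.mem_singleton]
        rw [hseen c]
      · rw [List.nodup_append]
        refine ⟨hnd, List.nodup_singleton m, ?_⟩
        intro a ha b hb
        simp only [List.mem_singleton] at hb
        subst hb
        exact fun h => hmout (h ▸ ha)
      · intro c
        simp only [List.mem_append, List.mem_singleton]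
        rw [hm c]
        constructor
        · rintro (⟨h1, h2⟩ | rfl)
          · exact ⟨Or.inl h1, h2⟩
          · exact ⟨Or.inr rfl, hmc⟩
        · rintro ⟨(h1 | rfl), h2⟩
          · exact Or.inl ⟨h1, h2⟩
          · exact Or.inr rfl
      · rw [List.pairwise_append]
        refine ⟨hpw, List.pairwise_singleton _ _, ?_⟩
        intro a ha b hb
        rw [List.mem_singleton] at hb
        subst hb
        unfold klt
        rw [hidx]
        exact hbd a ha
      · intro a ha
        rw [List.mem_append, List.mem_singleton] at ha
        simp only [List.length_append, List.length_cons, List.length_nil]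
        rcases ha with ha | rfl
        · have := hbd a ha; omega
        · rw [hidx]; omega
    · unfold ctB_step
      rw [if_neg hc]
      apply ih (P ++ [m]) out seen
      · rw [hT]; simp
      · exact hseen
      · exact hnd
      · intro c
        rw [hm c]
        simp only [List.mem_append, List.mem_singleton]
        push_neg at hc
        constructor
        · rintro ⟨h1, h2⟩; exact ⟨Or.inl h1, h2⟩
        · rintro ⟨(h1 | rfl), h2⟩
          · exact ⟨h1, h2⟩
          · exact ⟨(hm c).mp ((hseen c).mp (hc ((PySem.Set.mem_ofList _ _).mpr h2))) |>.1, h2⟩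
      · exact hpw
      · intro a ha
        have := hbd a ha
        simp only [List.length_append, List.length_cons, List.length_nil]
        omega

-- the two list-level algorithms agree
theorem lists_agree (tgt chars : List Char) :
    ctA_sort tgt (ctA_phase1 tgt chars) = ctB_collect (PySem.Set.ofList chars) tgt := by
  have hp := phase1_spec tgt chars [] List.nodup_nil
  have hpnd : (ctA_phase1 tgt chars).Nodup := hp.1
  have hpmem : ∀ c, c ∈ ctA_phase1 tgt chars ↔ c ∈ chars ∧ c ∈ tgt := by
    intro c
    have := hp.2 c
    simpa using this
  -- A side
  have houter := outer_sorts tgt (ctA_phase1 tgt chars) []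
    (by simp) (by intro a ha; simp only [List.nil_append] at ha; exact ((hpmem a).mp ha).2)
    (by simpa using hpnd)
  simp only [List.length_nil, List.nil_append] at houter
  have hA : ctA_sort tgt (ctA_phase1 tgt chars)
      = (List.range' 0 (ctA_phase1 tgt chars).length).foldl (ctA_outerStep tgt) (ctA_phase1 tgt chars) := by
    unfold ctA_sort
    rw [List.range_eq_range']
  rcases houter with ⟨hApm, hApw⟩
  -- B side
  have hB := ctB_invariant tgt chars tgt [] [] PySem.Set.empty
    (by simp) (by intro c; simp [PySem.Set.empty]) List.nodup_nil
    (by intro c; simp) (by simp) (by intro a ha; simp at ha)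
  rcases hB with ⟨hBnd, hBmem, hBpw⟩
  rw [hA]
  set LA := (List.range' 0 (ctA_phase1 tgt chars).length).foldl (ctA_outerStep tgt) (ctA_phase1 tgt chars) with hLA
  set LB := (tgt.foldl (ctB_step (PySem.Set.ofList chars)) ([], PySem.Set.empty)).1 with hLB
  have hAnd : LA.Nodup := hApm.symm.nodup hpnd
  have hperm : LA.Perm LB := by
    rw [List.perm_ext_iff_of_nodup hAnd hBnd]
    intro a
    rw [hApm.mem_iff, hpmem a, hBmem a]
    tauto
  exact hperm.eq_of_pairwise (by intro a b _ _ u v; unfold klt at u v; omega) hApw hBpw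

-- ===== VERDICT (by name: the statement is the Claim_ definition above) =====
theorem compute_target_tensor_py_spec : Claim_equal_compute_target_tensor_py := by
  intro in0 in1 target _ hpre
  unfold Spec_compute_target_tensor_py
  unfold compute_target_tensor_py compute_target_tensor_py_alt
  rcases hpre with ⟨h0, h1⟩
  have h0' : in0.toList ≠ [] := by
    intro h; apply h0; cases in0; simp_all
  have h1' : in1.toList ≠ [] := by
    intro h; apply h1; cases in1; simp_all
  rcases hg1 : PySem.List.pyGet? in1.toList (-1) with _ | c1
  · exfalso
    rw [PySem.List.pyGet?_eq_none_iff] at hg1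
    apply hg1
    have : in1.toList.length ≠ 0 := by simpa [List.length_eq_zero_iff] using h1'
    simp only [PySem.Raise.InRange]; omega
  rcases hg0 : PySem.List.pyGet? in0.toList (-1) with _ | c0
  · exfalso
    rw [PySem.List.pyGet?_eq_none_iff] at hg0
    apply hg0
    have : in0.toList.length ≠ 0 := by simpa [List.length_eq_zero_iff] using h0'
    simp only [PySem.Raise.InRange]; omega
  simp only []
  rw [lists_agree]
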